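-- pv_equiv track=rewrite | github.com/jclynb/aoc23 | d12.py | scan_group
-- ===== SOURCE A (Python) =====
-- import itertools
--
-- def scan_group(group, counts):
--     arrangement = 0
--     replacements = [".", "#"]
--      # Generate all possible replacements for '?'
--     replacement_combinations = itertools.product(replacements, repeat=len(group))
--     for comb in list(replacement_combinations):
--         comb = "".join(comb)
--         comb = comb.split(".")
--         comb = [x for x in comb if x != ""]
--         if len(comb) != len(counts):
--             continue
--         else:
--             if all([len(group) == count for group, count in zip(comb, counts)]):
--                 arrangement += 1
--     return arrangement
-- ===== SOURCE B (Python) =====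
-- def scan_group(group, counts):
--     # DP over (remaining length, next run index): count placements of the runs directly.
--     def f(k, j):
--         if j == len(counts):
--             return 1  # remaining cells are all '.'
--         if k == 0:
--             return 0
--         c = counts[j]
--         total = f(k - 1, j)  # first remaining cell is '.'
--         if 1 <= c <= k:
--             if c == k:
--                 if j + 1 == len(counts):
--                     total += 1
--             else:
--                 total += f(k - c - 1, j + 1)  # run of c '#' then a '.'
--         return total
--     return f(len(group), 0)
-- ===== Notes on version B (the rewrite author's own statement) =====
-- stated objective: faster
-- what changed: A enumerates all 2^n '.'/'#' strings of the group's length and tests each one's run lengths; B counts the arrangements directly with a recursion over (remaining length, remaining run counts) that places each run or a leading '.', never materialising any string.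
import Mathlib
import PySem

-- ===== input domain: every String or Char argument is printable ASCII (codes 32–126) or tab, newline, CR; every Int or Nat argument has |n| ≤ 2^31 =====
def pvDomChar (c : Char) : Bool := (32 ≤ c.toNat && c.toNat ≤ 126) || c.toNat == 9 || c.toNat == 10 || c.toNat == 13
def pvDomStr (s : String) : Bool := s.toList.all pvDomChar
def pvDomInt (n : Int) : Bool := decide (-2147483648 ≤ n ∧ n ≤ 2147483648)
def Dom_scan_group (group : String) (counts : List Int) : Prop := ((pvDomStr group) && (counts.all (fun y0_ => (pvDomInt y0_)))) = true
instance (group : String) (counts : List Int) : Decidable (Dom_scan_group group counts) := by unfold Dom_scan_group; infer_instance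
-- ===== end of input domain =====

-- B replaces A's enumeration of all 2^n strings by a run-placement recursion over
-- (remaining length, remaining run counts) — a genuinely different algorithm.

-- ===== PORT A =====
-- itertools.product([".", "#"], repeat=n), each element as a list of 1-char strings
def prodRep : Nat → List (List String)
  | 0 => [[]]
  | n + 1 => ([".", "#"] : List String).flatMap (fun c => (prodRep n).map (fun rest => c :: rest))

def scan_group (group : String) (counts : List Int) : Int :=
  (prodRep (PySem.Str.len group).toNat).foldl
    (fun arrangement comb =>
      let comb1 := PySem.Str.join "" comb
      -- '.' is a non-empty separator, so Python's split never raises: getD [] is unreachable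
      let comb2 := (PySem.Str.split? comb1 ".").getD []
      let comb3 := comb2.filter (fun x => x ≠ "")
      if comb3.length ≠ counts.length then arrangement
      else if (comb3.zip counts).all (fun gc => PySem.Str.len gc.1 == gc.2)
        then arrangement + 1 else arrangement)
    0

-- ===== PORT B =====
-- f(k, counts[j:]) from Source B: remaining suffix length k, remaining run counts as a list
def dpB : Nat → List Int → Int
  | _, [] => 1
  | 0, _ :: _ => 0
  | k + 1, c :: cs =>
    dpB k (c :: cs) +
      (if h : 1 ≤ c ∧ c ≤ (k : Int) + 1 then
        (if c = (k : Int) + 1 then (if cs = [] then 1 else 0)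
         else dpB (k + 1 - c.toNat - 1) cs)
      else 0)
  termination_by k _ => k
  decreasing_by
  · omega
  · omega

def scan_group_alt (group : String) (counts : List Int) : Int :=
  dpB (PySem.Str.len group).toNat counts

-- ===== PRECONDITION & SPEC =====
def Spec_scan_group (group : String) (counts : List Int) (out : Int) : Prop := out = scan_group_alt group counts
instance (group : String) (counts : List Int) (out : Int) : Decidable (Spec_scan_group group counts out) := by unfold Spec_scan_group; infer_instance

-- ===== CLAIM (what is proved, stated in full; the proofs are below) =====
def Claim_equal_scan_group : Prop := ∀ (group : String) (counts : List Int), Dom_scan_group group counts → Spec_scan_group group counts (scan_group group counts)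

-- ===== LEMMAS AND PROOFS =====

-- character / 1-char-string for a Bool ('#' = true, '.' = false)
def bchar (b : Bool) : Char := if b then '#' else '.'
def bstr (b : Bool) : String := if b then "#" else "."

-- all Bool lists of length n, mirroring prodRep's order
def allB : Nat → List (List Bool)
  | 0 => [[]]
  | n + 1 => ([false, true] : List Bool).flatMap (fun b => (allB n).map (fun rest => b :: rest))

-- split on '.' as a structural recursion: (current leading piece, remaining pieces)
def mySplit : List Char → List Char × List (List Char)
  | [] => ([], [])
  | c :: t =>
    let p := mySplit t
    if c = '.' then ([], p.1 :: p.2) else (c :: p.1, p.2)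

lemma mySplit_cons (c : Char) (t : List Char) :
    mySplit (c :: t)
      = if c = '.' then ([], (mySplit t).1 :: (mySplit t).2)
        else (c :: (mySplit t).1, (mySplit t).2) := rfl

-- run lengths of the '#'-blocks, with a pending run of length r
def runsAux : List Bool → Nat → List Nat
  | [], r => if r = 0 then [] else [r]
  | false :: t, r => if r = 0 then runsAux t 0 else r :: runsAux t 0
  | true :: t, r => runsAux t (r + 1)

-- number of Bool lists of length n whose runs (with pending r) are exactly cs
def cntF (n : Nat) (r : Nat) (cs : List Int) : Nat :=
  (allB n).countP (fun bs => decide ((runsAux bs r).map (Int.ofNat) = cs))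

lemma prodRep_eq (n : Nat) : prodRep n = (allB n).map (List.map bstr) := by
  induction n with
  | zero => rfl
  | succ n ih => simp [prodRep, allB, ih, List.map_map, Function.comp_def, bstr]

lemma foldl_if_count {α : Type} (f : α → Bool) (l : List α) (a : Int) :
    l.foldl (fun acc x => if f x then acc + 1 else acc) a = a + l.countP f := by
  induction l generalizing a with
  | nil => simp
  | cons x t ih =>
    simp only [List.foldl_cons, List.countP_cons]
    cases h : f x <;> simp [h, ih] <;> push_cast <;> ring

lemma go_spec (fuel : Nat) (l cur : List Char) (acc : List (List Char))
    (h : l.length < fuel) :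
    PySem.Chars.splitOn.go ['.'] fuel l cur acc
      = acc.reverse ++ (cur.reverse ++ (mySplit l).1) :: (mySplit l).2 := by
  induction fuel generalizing l cur acc with
  | zero => omega
  | succ fuel ih =>
    cases l with
    | nil => simp [PySem.Chars.splitOn.go, mySplit]
    | cons c rest =>
      by_cases hc : c = '.'
      · subst hc
        have hpre : (['.'] : List Char).isPrefixOf ('.' :: rest) = true := by
          simp [List.isPrefixOf]
        simp only [PySem.Chars.splitOn.go, hpre, if_true]
        rw [show List.drop (['.'] : List Char).length ('.' :: rest) = rest by simp]
        rw [ih rest [] (cur.reverse :: acc) (by simp at h ⊢; omega)]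
        simp [mySplit]
      · have hpre : (['.'] : List Char).isPrefixOf (c :: rest) = false := by
          simp [List.isPrefixOf, hc]
          intro hco
          exact absurd hco.symm hc
        simp only [PySem.Chars.splitOn.go, hpre, Bool.false_eq_true, if_false]
        rw [ih rest (c :: cur) acc (by simp at h ⊢; omega)]
        simp [mySplit, hc]

lemma splitOn_eq (l : List Char) :
    PySem.Chars.splitOn l ['.'] = (mySplit l).1 :: (mySplit l).2 := by
  have := go_spec (l.length + 1) l [] [] (by omega)
  simpa [PySem.Chars.splitOn] using this

lemma runs_of_split (bs : List Bool) (r : Nat) :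
    (((List.replicate r '#' ++ (mySplit (bs.map bchar)).1) :: (mySplit (bs.map bchar)).2).filter
        (fun x => x ≠ [])).map List.length = runsAux bs r := by
  induction bs generalizing r with
  | nil =>
    cases r with
    | zero => simp [mySplit, runsAux]
    | succ r => simp [mySplit, runsAux]
  | cons b t ih =>
    cases b with
    | false =>
      have h0 := ih 0
      simp only [List.replicate_zero, List.nil_append] at h0
      simp only [List.map_cons, show bchar false = '.' from rfl, mySplit_cons, runsAux]
      simp only [if_true, List.append_nil]
      cases r with
      | zero =>
        simp only [List.replicate_zero]
        rw [List.filter_cons_of_neg (by simp)]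
        exact h0
      | succ r =>
        rw [if_neg (by omega)]
        rw [List.filter_cons_of_pos (by simp)]
        simp only [List.map_cons, List.length_replicate]
        rw [h0]
    | true =>
      have h1 := ih (r + 1)
      simp only [List.map_cons, show bchar true = '#' from rfl, mySplit_cons, runsAux]
      split_ifs with hcc
      · exact absurd hcc (by decide)
      rw [show List.replicate r '#' ++ '#' :: (mySplit (List.map bchar t)).1
            = List.replicate (r + 1) '#' ++ (mySplit (List.map bchar t)).1 by
          rw [List.replicate_succ']; simp]
      exact h1

lemma zip_all_eq (xs : List String) (ys : List Int) :
    ((!decide (xs.length ≠ ys.length)) &&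
      (xs.zip ys).all (fun gc => PySem.Str.len gc.1 == gc.2)) = decide (xs.map PySem.Str.len = ys) := by
  induction xs generalizing ys with
  | nil => cases ys <;> simp
  | cons x xs ih =>
    cases ys with
    | nil => simp
    | cons y ys =>
      have hih := ih ys
      by_cases h : PySem.Str.len x = y <;>
        by_cases h2 : List.map PySem.Str.len xs = ys <;>
        by_cases h3 : xs.length = ys.length <;>
        simp_all [List.length_map] <;> (try exact hih)

lemma cntF_zero (r : Nat) (cs : List Int) :
    cntF 0 r cs = if (runsAux [] r).map (Int.ofNat) = cs then 1 else 0 := by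
  by_cases h : (runsAux [] r).map (Int.ofNat) = cs <;> simp [cntF, allB, List.countP_cons, h]

lemma cntF_succ (n : Nat) (r : Nat) (cs : List Int) :
    cntF (n + 1) r cs
      = cntF n (r + 1) cs +
        (if r = 0 then cntF n 0 cs
         else match cs with
          | [] => 0
          | c :: cs' => if c = (r : Int) then cntF n 0 cs' else 0) := by
  have hsucc : allB (n + 1) = (allB n).map (false :: ·) ++ (allB n).map (true :: ·) := by
    simp [allB, List.flatMap]
  rw [cntF, hsucc, List.countP_append, List.countP_map, List.countP_map]
  have htrue : ((fun bs => decide ((runsAux bs r).map (Int.ofNat) = cs)) ∘ (true :: ·))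
      = fun bs => decide ((runsAux bs (r + 1)).map (Int.ofNat) = cs) := by
    funext bs; simp [runsAux]
  rw [htrue]
  have : ((allB n).countP fun bs => decide ((runsAux bs (r + 1)).map (Int.ofNat) = cs)) = cntF n (r + 1) cs := rfl
  rw [this, Nat.add_comm]
  congr 1
  rcases Nat.eq_zero_or_pos r with hr | hr
  · subst hr
    simp only [if_pos rfl]
    have : ((fun bs => decide ((runsAux bs 0).map (Int.ofNat) = cs)) ∘ (false :: ·))
        = fun bs => decide ((runsAux bs 0).map (Int.ofNat) = cs) := by
      funext bs; simp [runsAux]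
    rw [this]; rfl
  · rw [if_neg (by omega)]
    have hfalse : ((fun bs => decide ((runsAux bs r).map (Int.ofNat) = cs)) ∘ (false :: ·))
        = fun bs => decide (((r : Int) :: (runsAux bs 0).map (Int.ofNat)) = cs) := by
      funext bs
      simp only [Function.comp_apply, runsAux, if_neg (by omega : ¬ r = 0), List.map_cons]
      norm_cast
    rw [hfalse]
    cases cs with
    | nil => simp
    | cons c cs' =>
      rw [show (match c :: cs' with
            | ([] : List Int) => 0
            | c :: cs' => if c = (r : Int) then cntF n 0 cs' else 0)
          = if c = (r : Int) then cntF n 0 cs' else 0 from rfl]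
      by_cases hc : c = (r : Int)
      · subst hc
        rw [if_pos rfl]
        have : (fun bs => decide (((r : Nat) : Int) :: (runsAux bs 0).map (Int.ofNat) = ((r : Nat) : Int) :: cs'))
            = fun bs => decide ((runsAux bs 0).map (Int.ofNat) = cs') := by
          funext bs; simp
        rw [this]; rfl
      · rw [if_neg hc]
        have : (fun bs => decide (((r : Int) :: (runsAux bs 0).map (Int.ofNat)) = c :: cs'))
            = fun _ => false := by
          funext bs; simp [Ne.symm hc, hc]
        rw [this]
        simp

lemma runsAux_ne_nil (bs : List Bool) (r : Nat) (h : 1 ≤ r) : runsAux bs r ≠ [] := by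
  induction bs generalizing r with
  | nil => simp [runsAux]; omega
  | cons b t ih =>
    cases b with
    | false => simp [runsAux, show ¬ r = 0 by omega]
    | true => exact ih (r + 1) (by omega)

lemma cntF_nil_pos (n r : Nat) (h : 1 ≤ r) : cntF n r [] = 0 := by
  rw [cntF, List.countP_eq_zero]
  intro bs _
  simp [runsAux_ne_nil bs r h]

-- the combined induction: cntF with no pending run is dpB, and a pending run of r ≥ 1
-- completes the head count c exactly as dpB's run placement does
lemma main_cnt (n : Nat) :
    (∀ cs, (cntF n 0 cs : Int) = dpB n cs) ∧
    (∀ (r : Nat) (c : Int) (cs' : List Int), 1 ≤ r →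
      (cntF n r (c :: cs') : Int)
        = if (r : Int) ≤ c ∧ c ≤ (r : Int) + n then
            (if c = (r : Int) + n then (if cs' = [] then 1 else 0)
             else dpB (n - (c - r).toNat - 1) cs')
          else 0) := by
  induction n with
  | zero =>
    constructor
    · intro cs
      cases cs with
      | nil => simp [cntF_zero, runsAux, dpB]
      | cons c cs' => simp [cntF_zero, runsAux, dpB]
    · intro r c cs' hr
      rw [cntF_zero]
      simp only [runsAux, if_neg (by omega : ¬ r = 0), List.map_cons, List.map_nil]
      push_cast
      by_cases h1 : ([Int.ofNat r] : List Int) = c :: cs'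
      · injection h1 with hc hcs
        subst hc; subst hcs
        simp
      · rw [if_neg h1]
        split_ifs with h2 h3 h4 <;> try rfl
        · exact absurd (by subst h4; simp; omega : ([Int.ofNat r] : List Int) = c :: cs') h1
        · exfalso; omega
  | succ n ih =>
    obtain ⟨ihA, ihL⟩ := ih
    constructor
    · intro cs
      cases cs with
      | nil =>
        rw [cntF_succ, if_pos rfl, cntF_nil_pos n 1 le_rfl]
        push_cast
        rw [ihA []]
        simp [dpB]
      | cons c cs' =>
        rw [cntF_succ, if_pos rfl]
        push_cast
        rw [ihA (c :: cs'), ihL 1 c cs' le_rfl]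
        rw [show dpB (n + 1) (c :: cs')
              = dpB n (c :: cs') +
                  (if h : 1 ≤ c ∧ c ≤ (n : Int) + 1 then
                    (if c = (n : Int) + 1 then (if cs' = [] then 1 else 0)
                     else dpB (n + 1 - c.toNat - 1) cs')
                  else 0) from by rw [dpB]]
        push_cast
        split_ifs with h1 h2 h3 h4 h5 <;> try ring
        all_goals try (exfalso; omega)
        all_goals (rw [show n - (-1 + c).toNat - 1 = 1 + n - c.toNat - 1 by omega]; ring)
    · intro r c cs' hr
      rw [cntF_succ, if_neg (by omega)]
      rw [show (match c :: cs' with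
            | ([] : List Int) => (0 : Nat)
            | c :: cs'' => if c = (r : Int) then cntF n 0 cs'' else 0)
          = if c = (r : Int) then cntF n 0 cs' else 0 from rfl]
      push_cast
      rw [ihL (r + 1) c cs' (by omega)]
      rw [ihA cs']
      push_cast
      split_ifs with h1 h2 h3 h4 h5 <;> try ring
      all_goals try (exfalso; omega)
      all_goals try (rw [show n - (-1 + c - (r : Int)).toNat - 1 = 1 + n - (c - (r : Int)).toNat - 1 by omega])
      all_goals try (rw [show 1 + n - (c - (r : Int)).toNat - 1 = n by omega])

lemma join_toList (bs : List Bool) :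
    (PySem.Str.join "" (bs.map bstr)).toList = bs.map bchar := by
  simp only [PySem.Str.join, String.toList_ofList]
  rw [show ("" : String).toList = [] from rfl]
  rw [List.map_map, show (String.toList ∘ bstr) = fun b => [bchar b] from
    funext (fun b => by cases b <;> rfl)]
  rw [show (fun b => [bchar b]) = (fun c => [c]) ∘ bchar from rfl, ← List.map_map]
  exact PySem.Chars.join_nil_singletons _

lemma comb3_len (bs : List Bool) :
    (((PySem.Str.split? (PySem.Str.join "" (bs.map bstr)) ".").getD []).filter
        (fun x => x ≠ "")).map PySem.Str.len = (runsAux bs 0).map Int.ofNat := by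
  rw [show PySem.Str.split? (PySem.Str.join "" (bs.map bstr)) "."
        = some (((PySem.Chars.splitOn (PySem.Str.join "" (bs.map bstr)).toList ['.']).map
            String.ofList)) from by
      simp [PySem.Str.split?, PySem.Chars.split?]]
  rw [join_toList, Option.getD_some, splitOn_eq]
  rw [List.filter_map]
  rw [show ((fun x => decide (x ≠ "")) ∘ String.ofList) = fun l => decide (l ≠ []) from
    funext (fun l => by simp)]
  rw [List.map_map]
  rw [show (PySem.Str.len ∘ String.ofList) = fun l => ((l.length : Int)) from
    funext (fun l => by simp [PySem.Str.len])]
  have h := runs_of_split bs 0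
  simp only [List.replicate_zero, List.nil_append] at h
  rw [show (fun l : List Char => ((l.length : Int))) = Int.ofNat ∘ List.length from rfl]
  rw [← List.map_map, h]

theorem scan_group_eq_alt (group : String) (counts : List Int) :
    scan_group group counts = scan_group_alt group counts := by
  rw [scan_group, scan_group_alt, prodRep_eq, List.foldl_map]
  have hstep : (fun (arrangement : Int) (bs : List Bool) =>
      let comb1 := PySem.Str.join "" (bs.map bstr)
      let comb2 := (PySem.Str.split? comb1 ".").getD []
      let comb3 := comb2.filter (fun x => x ≠ "")
      if comb3.length ≠ counts.length then arrangement
      else if (comb3.zip counts).all (fun gc => PySem.Str.len gc.1 == gc.2)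
        then arrangement + 1 else arrangement)
      = fun (arrangement : Int) (bs : List Bool) =>
          if (fun bs : List Bool => decide ((runsAux bs 0).map Int.ofNat = counts)) bs
            then arrangement + 1 else arrangement := by
    funext a bs
    simp only
    have hlen := comb3_len bs
    set xs := ((PySem.Str.split? (PySem.Str.join "" (bs.map bstr)) ".").getD []).filter
      (fun x => x ≠ "") with hxs
    have hcond := zip_all_eq xs counts
    rw [hlen] at hcond
    by_cases h1 : xs.length ≠ counts.length
    · rw [if_pos h1]
      rw [if_neg (by
        intro hc
        have : xs.map PySem.Str.len = counts := by rw [hlen]; exact of_decide_eq_true hc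
        exact h1 (by rw [← this]; simp))]
      -- both branches return a
    · rw [if_neg h1]
      have hb : (xs.zip counts).all (fun gc => PySem.Str.len gc.1 == gc.2)
          = decide ((runsAux bs 0).map Int.ofNat = counts) := by
        rw [← hcond]
        simp only [not_not] at h1
        simp [h1]
      rw [hb]
  rw [hstep, foldl_if_count, zero_add]
  exact (main_cnt (PySem.Str.len group).toNat).1 counts

-- ===== VERDICT (by name: the statement is the Claim_ definition above) =====
theorem scan_group_spec : Claim_equal_scan_group := by
  intro group counts _
  unfold Spec_scan_group
  exact scan_group_eq_alt group counts
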